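-- pv_equiv track=rewrite | github.com/cbrady2718/teamMates | main.py | format_team_years
-- ===== SOURCE A (Python) =====
-- def format_team_years(team_years_dict):
--     result = []
--
--     for team, years in team_years_dict.items():
--         # Sort the years to ensure they're in chronological order
--         sorted_years = sorted([int(year) for year in years])
--
--         # Initialize variables for tracking ranges
--         ranges = []
--         range_start = sorted_years[0]
--         prev_year = sorted_years[0]
--
--         # Iterate through years to find continuous ranges
--         for year in sorted_years[1:]:
--             if year == prev_year + 1:
--                 # Continuous range
--                 prev_year = year
--             else:
--                 # Gap in the range - end the current range
--                 if range_start == prev_year: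
--                     ranges.append(str(range_start))
--                 else:
--                     ranges.append(f"{range_start}->{prev_year}")
--
--                 # Start a new range
--                 range_start = year
--                 prev_year = year
--
--         # Add the final range
--         if range_start == prev_year:
--             ranges.append(str(range_start))
--         else:
--             ranges.append(f"{range_start}->{prev_year}")
--
--         # Create the formatted string for this team
--         team_str = f"{team}: {', '.join(ranges)}"
--         result.append(team_str)
--
--     return "\n".join(result)
-- ===== SOURCE B (Python) =====
-- def format_team_years(team_years_dict):
--     lines = []
--     for team, years in team_years_dict.items():
--         ys = sorted(int(y) for y in years)
--         n = len(ys)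
--         # staged passes: find every gap position, then emit each segment from its endpoints
--         cuts = [0] + [i for i in range(1, n) if ys[i] != ys[i - 1] + 1] + [n]
--         parts = [
--             str(ys[a]) if ys[a] == ys[b - 1] else f"{ys[a]}->{ys[b - 1]}"
--             for a, b in zip(cuts, cuts[1:])
--         ]
--         lines.append(f"{team}: {', '.join(parts)}")
--     return "\n".join(lines)
-- ===== Notes on version B (the rewrite author's own statement) =====
-- stated objective: alternative
-- what changed: A builds ranges in one stateful scan carrying (ranges, range_start, prev_year) with a post-loop final append; B uses staged passes: it first computes the list of all gap positions with a comprehension, then emits each segment directly from its two endpoints via pairwise zip of the cut-point list, with no carried state.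
import Mathlib
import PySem

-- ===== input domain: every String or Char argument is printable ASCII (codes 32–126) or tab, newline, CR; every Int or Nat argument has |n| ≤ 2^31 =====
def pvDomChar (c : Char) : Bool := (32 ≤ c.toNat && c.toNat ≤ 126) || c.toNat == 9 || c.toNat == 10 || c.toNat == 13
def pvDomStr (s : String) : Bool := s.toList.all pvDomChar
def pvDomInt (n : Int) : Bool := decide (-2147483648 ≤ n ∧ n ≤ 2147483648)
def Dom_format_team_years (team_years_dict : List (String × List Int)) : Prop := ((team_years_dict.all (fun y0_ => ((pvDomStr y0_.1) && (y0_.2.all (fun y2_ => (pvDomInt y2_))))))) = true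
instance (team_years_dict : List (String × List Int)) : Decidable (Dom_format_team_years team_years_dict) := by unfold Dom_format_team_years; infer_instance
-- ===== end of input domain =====

-- B replaces A's stateful single scan (ranges/range_start/prev_year with a post-loop final append)
-- by staged passes: first compute all gap positions with a comprehension, then emit each segment
-- from its two endpoints via pairwise zip of the cut-point list.  Objective: alternative (same cost).

-- str(a) / f"{a}->{b}" for one range (identical formatting in Source A and Source B, shared by both ports)
def pvFmt (a b : Int) : List Char :=
  if a = b then PySem.Int.toChars a
  else PySem.Int.toChars a ++ ['-', '>'] ++ PySem.Int.toChars b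

-- ===== PORT A =====

-- the body of A's inner 'for year in sorted_years[1:]' loop; state = (ranges, range_start, prev_year)
def pvStepA (st : List (List Char) × Int × Int) (y : Int) : List (List Char) × Int × Int :=
  if y = st.2.2 + 1 then (st.1, st.2.1, y)
  else (st.1 ++ [pvFmt st.2.1 st.2.2], y, y)

-- A's per-team body; the [] branch is where Python raises IndexError (excluded by Pre_)
def pvTeamA (years : List Int) : List Char :=
  match PySem.List.sorted (years.map (fun y => y)) (fun y => y) false with
  | [] => []
  | x :: rest =>
    let st := rest.foldl pvStepA ([], x, x)
    PySem.Chars.join [',', ' '] (st.1 ++ [pvFmt st.2.1 st.2.2])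

def format_team_years (team_years_dict : List (String × List Int)) : String :=
  String.ofList (PySem.Chars.join ['\n']
    ((PySem.Dict.ofList team_years_dict).items.foldl
      (fun result p => result ++ [p.1.toList ++ [':', ' '] ++ pvTeamA p.2]) []))

-- ===== PORT B =====
-- Source B's per-team body: cuts = [0] + gap positions + [n]; parts from pairwise zip of cuts.
-- ys.getD is exact for Python ys[i] here: every index reached is in range for nonempty ys (Pre_).
def pvTeamB (years : List Int) : List Char :=
  let ys := PySem.List.sorted (years.map (fun y => y)) (fun y => y) false
  let n := ys.length
  let cuts := [0] ++ ((List.range' 1 (n - 1)).filter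
      (fun i => !(ys.getD i 0 == ys.getD (i - 1) 0 + 1))) ++ [n]
  let parts := (cuts.zip (cuts.drop 1)).map
      (fun p => pvFmt (ys.getD p.1 0) (ys.getD (p.2 - 1) 0))
  PySem.Chars.join [',', ' '] parts

def format_team_years_alt (team_years_dict : List (String × List Int)) : String :=
  String.ofList (PySem.Chars.join ['\n']
    ((PySem.Dict.ofList team_years_dict).items.foldl
      (fun lines p => lines ++ [p.1.toList ++ [':', ' '] ++ pvTeamB p.2]) []))

-- ===== PRECONDITION & SPEC =====
-- A raises IndexError (sorted_years[0]) on any team whose year list is empty (B raises there too);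
-- Pre_ excludes exactly those dicts.
def Pre_format_team_years (team_years_dict : List (String × List Int)) : Prop :=
  ∀ p ∈ (PySem.Dict.ofList team_years_dict).items, p.2 ≠ []

instance (team_years_dict : List (String × List Int)) : Decidable (Pre_format_team_years team_years_dict) := by
  unfold Pre_format_team_years; infer_instance

def pvWitness_format_team_years : (List (String × List Int)) := [("A", [1, 2, 4])]

def Spec_format_team_years (team_years_dict : List (String × List Int)) (out : String) : Prop := out = format_team_years_alt team_years_dict
instance (team_years_dict : List (String × List Int)) (out : String) : Decidable (Spec_format_team_years team_years_dict out) := by unfold Spec_format_team_years; infer_instance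

-- ===== CLAIM (what is proved, stated in full; the proofs are below) =====
def Claim_equal_format_team_years : Prop := ∀ (team_years_dict : List (String × List Int)), Dom_format_team_years team_years_dict → Pre_format_team_years team_years_dict → Spec_format_team_years team_years_dict (format_team_years team_years_dict)

-- ===== LEMMAS AND PROOFS =====

-- proof-side normal form: the list of maximal consecutive runs
def pvRun : Int → List Int → Int × List Int
  | prev, [] => (prev, [])
  | prev, y :: ys => if y = prev + 1 then pvRun y ys else (prev, y :: ys)

theorem pvRun_snd_le : ∀ (prev : Int) (l : List Int), (pvRun prev l).2.length ≤ l.length := by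
  intro prev l
  induction l generalizing prev with
  | nil => simp [pvRun]
  | cons y ys ih =>
    simp only [pvRun]
    split
    · exact le_trans (ih y) (Nat.le_succ _)
    · simp

def pvRuns : List Int → List (List Char)
  | [] => []
  | x :: ys => pvFmt x (pvRun x ys).1 :: pvRuns (pvRun x ys).2
termination_by l => l.length
decreasing_by have := pvRun_snd_le x ys; simp; omega

-- A's scan computes the runs
theorem foldA_eq : ∀ (l : List Int) (ranges : List (List Char)) (start prev : Int),
    (let st := l.foldl pvStepA (ranges, start, prev); st.1 ++ [pvFmt st.2.1 st.2.2])
    = ranges ++ pvFmt start (pvRun prev l).1 :: pvRuns (pvRun prev l).2 := by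
  intro l
  induction l with
  | nil => intro ranges start prev; simp [pvRun, pvRuns]
  | cons y ys ih =>
    intro ranges start prev
    simp only [List.foldl_cons, pvStepA, pvRun]
    by_cases h : y = prev + 1
    · simp only [if_pos h]
      exact ih ranges start y
    · simp only [if_neg h]
      rw [ih (ranges ++ [pvFmt start prev]) y y]
      simp [pvRuns]

-- B-side proof machinery: pairwise pairs of a list, and the cut list from position s
def pvPairs : List Nat → List (Nat × Nat)
  | a :: b :: r => (a, b) :: pvPairs (b :: r)
  | _ => []

theorem zip_drop1_eq_pvPairs : ∀ (l : List Nat), l.zip (l.drop 1) = pvPairs l := by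
  intro l
  induction l with
  | nil => rfl
  | cons a t ih =>
    cases t with
    | nil => rfl
    | cons b r =>
      simp only [List.drop_succ_cons, List.drop_zero, List.zip_cons_cons, pvPairs]
      simpa using ih

def pvGap (ys : List Int) (i : Nat) : Bool := !(ys.getD i 0 == ys.getD (i - 1) 0 + 1)

def pvCuts (ys : List Int) (s : Nat) : List Nat :=
  s :: ((List.range' (s + 1) (ys.length - (s + 1))).filter (pvGap ys) ++ [ys.length])

-- pvRun from position s lands on the run's last index e: no gap inside (s, e], a gap at e+1 if any
theorem run_drop (ys : List Int) : ∀ (k s : Nat), ys.length - s ≤ k → s < ys.length →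
    ∃ e, s ≤ e ∧ e < ys.length ∧
      pvRun (ys.getD s 0) (ys.drop (s + 1)) = (ys.getD e 0, ys.drop (e + 1)) ∧
      (∀ i, s < i → i ≤ e → ys.getD i 0 = ys.getD (i - 1) 0 + 1) ∧
      (e + 1 < ys.length → ¬ ys.getD (e + 1) 0 = ys.getD e 0 + 1) := by
  intro k
  induction k with
  | zero => intro s hk hs; omega
  | succ k ih =>
    intro s hk hs
    by_cases hlt : s + 1 < ys.length
    · have hdrop : ys.drop (s + 1) = ys[s + 1] :: ys.drop (s + 2) := List.drop_eq_getElem_cons hlt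
      rw [hdrop, pvRun]
      by_cases hc : ys[s + 1] = ys.getD s 0 + 1
      · rw [if_pos hc]
        obtain ⟨e, he1, he2, he3, he4, he5⟩ := ih (s + 1) (by omega) hlt
        refine ⟨e, by omega, he2, ?_, ?_, he5⟩
        · rw [← he3, List.getD_eq_getElem ys 0 hlt]
        · intro i hi1 hi2
          rcases Nat.lt_or_ge s.succ i with h' | h'
          · exact he4 i h' hi2
          · have : i = s + 1 := by omega
            subst this
            simp only [Nat.add_sub_cancel]
            rw [List.getD_eq_getElem ys 0 hlt]
            exact hc
      · rw [if_neg hc]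
        refine ⟨s, le_refl s, hs, by rw [hdrop], by omega, ?_⟩
        intro _ hcon
        rw [List.getD_eq_getElem ys 0 hlt] at hcon
        exact hc hcon
    · have hnil : ys.drop (s + 1) = [] := List.drop_eq_nil_of_le (by omega)
      rw [hnil, pvRun]
      exact ⟨s, le_refl s, hs, by rw [hnil], by omega, by omega⟩

-- the cut-point pairs from s formatted = the runs of the suffix from s
theorem cuts_runs (ys : List Int) : ∀ (k s : Nat), ys.length - s ≤ k → s < ys.length →
    (pvPairs (pvCuts ys s)).map (fun p => pvFmt (ys.getD p.1 0) (ys.getD (p.2 - 1) 0))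
      = pvRuns (ys.drop s) := by
  intro k
  induction k with
  | zero => intro s hk hs; omega
  | succ k ih =>
    intro s hk hs
    obtain ⟨e, he1, he2, he3, he4, he5⟩ := run_drop ys (ys.length - s) s (le_refl _) hs
    have hdrop : ys.drop s = ys[s] :: ys.drop (s + 1) := List.drop_eq_getElem_cons hs
    have hruns : pvRuns (ys.drop s)
        = pvFmt (ys.getD s 0) (ys.getD e 0) :: pvRuns (ys.drop (e + 1)) := by
      rw [hdrop, pvRuns, ← List.getD_eq_getElem ys 0 hs, he3]
    -- split the filtered range at e+1
    have hsplit : List.range' (s + 1) (ys.length - (s + 1))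
        = List.range' (s + 1) (e - s) ++ List.range' (e + 1) (ys.length - (e + 1)) := by
      have h1 : s + 1 + (e - s) = e + 1 := by omega
      have h2 : ys.length - (s + 1) = (e - s) + (ys.length - (e + 1)) := by omega
      rw [h2, ← List.range'_append_1, h1]
    have hfilt1 : (List.range' (s + 1) (e - s)).filter (pvGap ys) = [] := by
      rw [List.filter_eq_nil_iff]
      intro i hi
      rw [List.mem_range'_1] at hi
      have hg : pvGap ys i = false := by
        unfold pvGap
        rw [Bool.not_eq_false', beq_iff_eq]
        exact he4 i (by omega) (by omega)
      simp [hg]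
    by_cases hend : e + 1 < ys.length
    · have hr2 : List.range' (e + 1) (ys.length - (e + 1))
          = (e + 1) :: List.range' (e + 2) (ys.length - (e + 2)) := by
        have h2 : ys.length - (e + 1) = (ys.length - (e + 2)) + 1 := by omega
        rw [h2, List.range'_succ]
      have hgap : pvGap ys (e + 1) = true := by
        simp only [pvGap, Nat.add_sub_cancel, Bool.not_eq_eq_eq_not, Bool.not_true, beq_eq_false_iff_ne]
        exact he5 hend
      have hcuts : pvCuts ys s = s :: pvCuts ys (e + 1) := by
        rw [pvCuts, hsplit, List.filter_append, hfilt1, hr2, List.filter_cons, hgap, pvCuts]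
        simp
      rw [hcuts, pvCuts, pvPairs, List.map_cons, ← pvCuts]
      rw [ih (e + 1) (by omega) hend]
      rw [hruns]
      simp
    · have he : e = ys.length - 1 := by omega
      have hr2 : List.range' (e + 1) (ys.length - (e + 1)) = [] := by
        have : ys.length - (e + 1) = 0 := by omega
        rw [this, List.range'_zero]
      have hcuts : pvCuts ys s = [s, ys.length] := by
        rw [pvCuts, hsplit, List.filter_append, hfilt1, hr2]
        rfl
      rw [hcuts]
      have hlast : ys.drop (e + 1) = [] := List.drop_eq_nil_of_le (by omega)
      rw [hruns, hlast]
      simp only [pvPairs, List.map_cons, List.map_nil, pvRuns]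
      rw [he]

-- per-team agreement on a nonempty year list
theorem team_eq (years : List Int) (h : years ≠ []) : pvTeamA years = pvTeamB years := by
  unfold pvTeamA pvTeamB
  have hs : PySem.List.sorted (years.map (fun y => y)) (fun y => y) false ≠ [] := by
    rw [Ne, PySem.List.sorted_eq_nil_iff]
    simpa using h
  set s := PySem.List.sorted (years.map (fun y => y)) (fun y => y) false with hsdef
  match hm : s with
  | [] => exact absurd rfl hs
  | x :: rest =>
    show PySem.Chars.join [',', ' '] _ = PySem.Chars.join [',', ' '] _
    congr 1
    rw [zip_drop1_eq_pvPairs]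
    have hb : ([0] ++ ((List.range' 1 ((x :: rest).length - 1)).filter
        (fun i => !((x :: rest).getD i 0 == (x :: rest).getD (i - 1) 0 + 1))) ++ [(x :: rest).length])
        = pvCuts (x :: rest) 0 := by
      rw [pvCuts]
      rfl
    rw [hb, cuts_runs (x :: rest) (x :: rest).length 0 (by omega) (by simp)]
    rw [foldA_eq rest [] x x]
    simp [pvRuns]

theorem format_team_years_spec : Claim_equal_format_team_years := by
  intro d _ hpre
  unfold Spec_format_team_years format_team_years format_team_years_alt
  rw [PySem.List.foldl_append_singleton_eq_map, PySem.List.foldl_append_singleton_eq_map]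
  have hmap : ((PySem.Dict.ofList d).items).map (fun p => p.1.toList ++ [':', ' '] ++ pvTeamA p.2)
      = ((PySem.Dict.ofList d).items).map (fun p => p.1.toList ++ [':', ' '] ++ pvTeamB p.2) :=
    List.map_congr_left (fun p hp => by rw [team_eq p.2 (hpre p hp)])
  rw [List.nil_append, List.nil_append, hmap]
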